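-- pv_equiv track=rewrite | github.com/imbus/testbench-vscode-extension | testbench-language-server/testbench_language_server/server.py | _count_trailing_newline_characters
-- ===== SOURCE A (Python) =====
-- def _count_trailing_newline_characters(source_text: str) -> int:
--     trailing_newline_count = 0
--     index = len(source_text) - 1
--
--     # Count trailing LF and CRLF line breaks at EOF.
--     while index >= 0:
--         if source_text[index] != "\n":
--             break
--         trailing_newline_count += 1
--         index -= 1
--         if index >= 0 and source_text[index] == "\r":
--             index -= 1
--
--     return trailing_newline_count
-- ===== SOURCE B (Python) =====
-- import re
--
--
-- def _count_trailing_newline_characters(source_text: str) -> int: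
--     # Maximal run of LF/CRLF line breaks anchored at end-of-string.
--     return re.search(r'(?:\r?\n)*$', source_text).group().count("\n")
-- ===== Notes on version B (the rewrite author's own statement) =====
-- stated objective: idiomatic
-- what changed: A walks indices backwards from the end of the string, consuming an LF and an optional preceding CR per step; B instead searches for the end-anchored regex of repeated optional-CR-then-LF groups (the leftmost all-breaks suffix) and counts the LF characters inside the match.
import Mathlib
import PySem

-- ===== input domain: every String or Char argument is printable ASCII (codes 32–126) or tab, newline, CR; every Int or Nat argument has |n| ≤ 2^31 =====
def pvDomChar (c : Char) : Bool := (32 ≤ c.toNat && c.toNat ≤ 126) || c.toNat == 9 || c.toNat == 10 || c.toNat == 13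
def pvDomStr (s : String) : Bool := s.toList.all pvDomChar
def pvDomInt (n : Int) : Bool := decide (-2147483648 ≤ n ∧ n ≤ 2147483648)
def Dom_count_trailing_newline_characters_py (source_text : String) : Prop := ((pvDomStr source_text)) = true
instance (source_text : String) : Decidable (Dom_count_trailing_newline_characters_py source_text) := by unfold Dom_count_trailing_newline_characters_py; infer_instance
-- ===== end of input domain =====

-- B replaces A's explicit backward index walk by a regex-style search for the
-- maximal trailing run of \r?\n groups, counting the '\n' characters in it (idiomatic; no speed claim).


-- ===== PORT A =====
-- the while loop: state (trailing_newline_count, index); terminates because index decreases.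
def pyA_loop (l : List Char) (cnt : Int) (idx : Int) : Int :=
  if _h : 0 ≤ idx then
    match PySem.List.pyGet? l idx with
    | none => cnt          -- unreachable when idx < len l (Python would raise IndexError)
    | some c =>
      if c ≠ '\n' then cnt
      else
        -- index -= 1; if index >= 0 and source_text[index] == '\r': index -= 1
        if _h2 : 0 ≤ idx - 1 ∧ PySem.List.pyGet? l (idx - 1) = some '\r' then
          pyA_loop l (cnt + 1) (idx - 2)
        else
          pyA_loop l (cnt + 1) (idx - 1)
  else cnt
termination_by (idx + 1).toNat
decreasing_by all_goals (simp_wf; omega)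

def count_trailing_newline_characters_py (source_text : String) : Int :=
  pyA_loop source_text.toList 0 ((PySem.Str.len source_text : Int) - 1)

-- ===== PORT B =====
-- isBreaks l ↔ l is a concatenation of \r?\n groups, i.e. the regex (?:\r?\n)* matches l entirely.
def isBreaks : List Char → Bool
  | [] => true
  | '\r' :: '\n' :: t => isBreaks t
  | '\n' :: t => isBreaks t
  | _ => false

-- re.search(r'(?:\r?\n)*$', s): the LEFTMOST position where the anchored pattern matches,
-- i.e. the longest suffix that is a concatenation of \r?\n groups (always exists: [] at EOS).
-- Exact: (?:\r?\n)*$ matches at i iff s[i:] is entirely \r?\n groups.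
def matchFrom : List Char → List Char
  | [] => []
  | c :: t => if isBreaks (c :: t) then c :: t else matchFrom t

-- m.group().count('\n'): for a single-character needle str.count is the character count.
def count_trailing_newline_characters_py_alt (source_text : String) : Int :=
  ((matchFrom source_text.toList).count '\n' : Int)

-- ===== PRECONDITION & SPEC =====
def Spec_count_trailing_newline_characters_py (source_text : String) (out : Int) : Prop := out = count_trailing_newline_characters_py_alt source_text
instance (source_text : String) (out : Int) : Decidable (Spec_count_trailing_newline_characters_py source_text out) := by unfold Spec_count_trailing_newline_characters_py; infer_instance

-- ===== CLAIM (what is proved, stated in full; the proofs are below) =====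
def Claim_equal_count_trailing_newline_characters_py : Prop := ∀ (source_text : String), Dom_count_trailing_newline_characters_py source_text → Spec_count_trailing_newline_characters_py source_text (count_trailing_newline_characters_py source_text)

-- ===== LEMMAS AND PROOFS =====

-- kRev r = number of line breaks consumed from the front of the REVERSED string:
-- groups '\n' optionally followed by '\r' (the reverse of \r?\n).
def kRev : List Char → Nat
  | '\n' :: '\r' :: t => kRev t + 1
  | '\n' :: t => kRev t + 1
  | _ => 0

-- revAll r = kRev consumes all of r (r is entirely reversed groups).
def revAll : List Char → Bool
  | [] => true
  | '\n' :: '\r' :: t => revAll t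
  | '\n' :: t => revAll t
  | _ => false

lemma kRev_cons_ne (c : Char) (t : List Char) (h : c ≠ '\n') : kRev (c :: t) = 0 := by
  rw [kRev.eq_def]; split <;> simp_all

lemma kRev_nl (t : List Char) (h : t.head? ≠ some '\r') : kRev ('\n' :: t) = kRev t + 1 := by
  rw [kRev.eq_def]; split <;> simp_all

lemma revAll_cons_ne (c : Char) (t : List Char) (h : c ≠ '\n') : revAll (c :: t) = false := by
  rw [revAll.eq_def]; split <;> simp_all

lemma isBreaks_cons_ne (c : Char) (t : List Char) (h1 : c ≠ '\n') (h2 : c ≠ '\r') :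
    isBreaks (c :: t) = false := by
  rw [isBreaks.eq_def]; split <;> simp_all

lemma isBreaks_nl (t : List Char) : isBreaks ('\n' :: t) = isBreaks t := by
  rw [isBreaks.eq_def]; split <;> simp_all

lemma isBreaks_cr (t : List Char) (h : t.head? ≠ some '\n') : isBreaks ('\r' :: t) = false := by
  rw [isBreaks.eq_def]; split <;> simp_all

lemma revAll_nl (t : List Char) (h : t.head? ≠ some '\r') : revAll ('\n' :: t) = revAll t := by
  rw [revAll.eq_def]; split <;> simp_all

-- K: appending one character to the reversed string adds one break iff everything
-- before it was consumed and the character is '\n'.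
lemma kRev_append (r : List Char) (c : Char) :
    kRev (r ++ [c]) = kRev r + (if revAll r = true ∧ c = '\n' then 1 else 0) := by
  induction r using kRev.induct with
  | case1 t ih =>
    simp only [List.cons_append, kRev, revAll, ih]; split_ifs <;> omega
  | case2 t hne ih =>
    rcases t with _ | ⟨d, t'⟩
    · by_cases hc : c = '\n'
      · subst hc; decide
      · by_cases hc2 : c = '\r'
        · subst hc2; simp [kRev, revAll, hc]
        · rw [List.cons_append, List.nil_append, kRev_nl [c] (by simp [hc2]),
              kRev_cons_ne c [] hc]
          simp [kRev, revAll, hc]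
    · have hd : d ≠ '\r' := fun h => hne t' (by rw [h])
      rw [List.cons_append, kRev_nl _ (by simp [hd]), ih,
          kRev_nl _ (by simp [hd]), revAll_nl _ (by simp [hd])]
      split_ifs <;> omega
  | case3 r h1 h2 =>
    rcases r with _ | ⟨c', t⟩
    · by_cases hc : c = '\n' <;> simp [kRev, revAll, hc]
    · have hc' : c' ≠ '\n' := fun h => h2 t (by rw [h])
      rw [List.cons_append, kRev_cons_ne c' _ hc', kRev_cons_ne c' _ hc',
          revAll_cons_ne c' _ hc']
      simp

-- A1–A3: how isBreaks behaves under appends at the END.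
lemma isBreaks_append_crlf (u : List Char) : isBreaks (u ++ ['\r', '\n']) = isBreaks u := by
  induction u using isBreaks.induct with
  | case1 => decide
  | case2 t ih => simp only [List.cons_append, isBreaks, ih]
  | case3 t ih => simp only [List.cons_append, isBreaks_nl, ih]
  | case4 u h0 h1 h2 =>
    rcases u with _ | ⟨c', t⟩
    · exact absurd rfl h0
    · have hc1 : c' ≠ '\n' := fun h => h2 t (by rw [h])
      by_cases hc2 : c' = '\r'
      · subst hc2
        have ht : ∀ t', t ≠ '\n' :: t' := fun t' h => h1 t' (by rw [h])
        rcases t with _ | ⟨d, t'⟩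
        · decide
        · have hd : d ≠ '\n' := fun h => ht t' (by rw [h])
          rw [List.cons_append, isBreaks_cr _ (by simp [hd]), isBreaks_cr _ (by simp [hd])]
      · rw [List.cons_append, isBreaks_cons_ne c' _ hc1 hc2, isBreaks_cons_ne c' _ hc1 hc2]

lemma isBreaks_append_lf (u : List Char) (h : u.getLast? ≠ some '\r') :
    isBreaks (u ++ ['\n']) = isBreaks u := by
  induction u using isBreaks.induct with
  | case1 => decide
  | case2 t ih =>
    have ht : t.getLast? ≠ some '\r' := by
      rcases t with _ | ⟨d, t'⟩
      · simp
      · simpa [List.getLast?_cons_cons] using h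
    simp only [List.cons_append, isBreaks, ih ht]
  | case3 t ih =>
    have ht : t.getLast? ≠ some '\r' := by
      rcases t with _ | ⟨d, t'⟩
      · simp
      · simpa using h
    simp only [List.cons_append, isBreaks_nl, ih ht]
  | case4 u h0 h1 h2 =>
    rcases u with _ | ⟨c', t⟩
    · exact absurd rfl h0
    · have hc1 : c' ≠ '\n' := fun hh => h2 t (by rw [hh])
      by_cases hc2 : c' = '\r'
      · subst hc2
        have ht : ∀ t', t ≠ '\n' :: t' := fun t' hh => h1 t' (by rw [hh])
        rcases t with _ | ⟨d, t'⟩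
        · exact absurd (by simp) h
        · have hd : d ≠ '\n' := fun hh => ht t' (by rw [hh])
          rw [List.cons_append, isBreaks_cr _ (by simp [hd]), isBreaks_cr _ (by simp [hd])]
      · rw [List.cons_append, isBreaks_cons_ne c' _ hc1 hc2, isBreaks_cons_ne c' _ hc1 hc2]

lemma isBreaks_append_ne (u : List Char) (c : Char) (h : c ≠ '\n') :
    isBreaks (u ++ [c]) = false := by
  induction u using isBreaks.induct with
  | case1 =>
    by_cases hc2 : c = '\r'
    · subst hc2; decide
    · exact isBreaks_cons_ne c [] h hc2
  | case2 t ih => simp only [List.cons_append, isBreaks, ih]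
  | case3 t ih => simp only [List.cons_append, isBreaks_nl, ih]
  | case4 u h0 h1 h2 =>
    rcases u with _ | ⟨c', t⟩
    · exact absurd rfl h0
    · have hc1 : c' ≠ '\n' := fun hh => h2 t (by rw [hh])
      by_cases hc2 : c' = '\r'
      · subst hc2
        have ht : ∀ t', t ≠ '\n' :: t' := fun t' hh => h1 t' (by rw [hh])
        rcases t with _ | ⟨d, t'⟩
        · exact isBreaks_cr [c] (by simp [h])
        · have hd : d ≠ '\n' := fun hh => ht t' (by rw [hh])
          rw [List.cons_append, isBreaks_cr _ (by simp [hd])]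
      · rw [List.cons_append, isBreaks_cons_ne c' _ hc1 hc2]

-- L': revAll on the reversed string is isBreaks on the string.
lemma revAll_reverse (r : List Char) : revAll r = isBreaks r.reverse := by
  induction r using revAll.induct with
  | case1 => decide
  | case2 t ih =>
    have : ('\n' :: '\r' :: t).reverse = t.reverse ++ ['\r', '\n'] := by
      simp [List.reverse_cons, List.append_assoc]
    rw [this, isBreaks_append_crlf]
    simpa [revAll] using ih
  | case3 t hne ih =>
    have hh : t.head? ≠ some '\r' := by
      rcases t with _ | ⟨d, t'⟩
      · simp
      · simp only [List.head?_cons]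
        exact fun h => hne t' (by rw [Option.some.inj h])
    rw [revAll_nl t hh, List.reverse_cons, isBreaks_append_lf _ (by rwa [List.getLast?_reverse]), ih]
  | case4 r h0 h1 h2 =>
    rcases r with _ | ⟨c', t⟩
    · exact absurd rfl h0
    · have hc1 : c' ≠ '\n' := fun hh => by
        rcases t with _ | ⟨d, t'⟩
        · exact h2 [] (by rw [hh])
        · by_cases hd : d = '\r'
          · exact h1 t' (by rw [hh, hd])
          · exact h2 (d :: t') (by rw [hh])
      rw [revAll_cons_ne c' t hc1, List.reverse_cons, isBreaks_append_ne _ _ hc1]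

-- C: on a pure break string the reversed-group count is the '\n' count.
lemma kRev_reverse_of_isBreaks (u : List Char) (h : isBreaks u = true) :
    kRev u.reverse = u.count '\n' := by
  induction u using isBreaks.induct with
  | case1 => decide
  | case2 t ih =>
    have ht : isBreaks t = true := by simpa [isBreaks] using h
    have : ('\r' :: '\n' :: t).reverse = (t.reverse ++ ['\n']) ++ ['\r'] := by
      simp [List.reverse_cons, List.append_assoc]
    rw [this, kRev_append, kRev_append, revAll_reverse, List.reverse_reverse, ht]
    simp [ih ht]
  | case3 t ih =>
    have ht : isBreaks t = true := by rwa [isBreaks_nl] at h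
    rw [List.reverse_cons, kRev_append, revAll_reverse, List.reverse_reverse, ht]
    simp [ih ht]
  | case4 u h0 h1 h2 =>
    rcases u with _ | ⟨c', t⟩
    · exact absurd rfl h0
    · exfalso
      have hc1 : c' ≠ '\n' := fun hh => h2 t (by rw [hh])
      by_cases hc2 : c' = '\r'
      · subst hc2
        have ht : ∀ t', t ≠ '\n' :: t' := fun t' hh => h1 t' (by rw [hh])
        rcases t with _ | ⟨d, t'⟩
        · simp [isBreaks_cr [] (by simp)] at h
        · have hd : d ≠ '\n' := fun hh => ht t' (by rw [hh])
          simp [isBreaks_cr (d :: t') (by simp [hd])] at h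
      · simp [isBreaks_cons_ne c' t hc1 hc2] at h

-- M: B's result equals the reversed-group count.
lemma matchFrom_count (l : List Char) : (matchFrom l).count '\n' = kRev l.reverse := by
  induction l with
  | nil => decide
  | cons c t ih =>
    by_cases hb : isBreaks (c :: t) = true
    · rw [matchFrom, if_pos hb, ← kRev_reverse_of_isBreaks _ hb]
    · rw [matchFrom, if_neg hb, ih, List.reverse_cons, kRev_append]
      have : ¬ (revAll t.reverse = true ∧ c = '\n') := by
        rintro ⟨h1, rfl⟩
        rw [revAll_reverse, List.reverse_reverse] at h1
        rw [isBreaks_nl, h1] at hb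
        exact hb rfl
      rw [if_neg this]
      omega

-- A's loop computes the reversed-group count of the processed prefix.
lemma pyA_loop_eq (m : Nat) (l : List Char) (cnt : Int) (hm : m ≤ l.length) :
    pyA_loop l cnt ((m : Int) - 1) = cnt + (kRev ((l.take m).reverse) : Int) := by
  induction m using Nat.strong_induction_on generalizing cnt with
  | _ m ih =>
    match m, hm with
    | 0, _ =>
      rw [pyA_loop]
      norm_num [kRev]
    | (j+1), hm =>
      have hj : j < l.length := by omega
      have hidx : (((j+1 : Nat) : Int)) - 1 = (j : Int) := by push_cast; ring
      have hget : PySem.List.pyGet? l (j : Int) = some l[j] := by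
        simp [PySem.List.pyGet?_natCast, List.getElem?_eq_getElem hj]
      have htake : (l.take (j+1)).reverse = l[j] :: (l.take j).reverse := by
        rw [List.take_add_one, List.getElem?_eq_getElem hj]
        simp
      rw [hidx, pyA_loop, dif_pos (by positivity : (0:Int) ≤ (j : Int)), hget, htake]
      by_cases hc : l[j] = '\n'
      case neg =>
        simp only [ne_eq, hc, not_false_eq_true, if_true, kRev_cons_ne _ _ hc]
        simp
      case pos =>
        simp only [hc, ne_eq, not_true_eq_false, if_false]
        match j, hj with
        | 0, _ =>
          have hcond : ¬ ((0:Int) ≤ (0:Int) - 1 ∧ PySem.List.pyGet? l ((0:Int) - 1) = some '\r') := by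
            rintro ⟨h1, -⟩; omega
          simp only [Nat.cast_zero]
          rw [dif_neg hcond]
          have := ih 0 (by omega) (cnt + 1) (by omega)
          norm_num at this
          rw [show (0:Int) - 1 = -1 by ring, this]
          norm_num [List.take_zero, kRev_nl [] (by simp), kRev]
        | (j'+1), hj =>
          have hj' : j' < l.length := by omega
          have hget' : PySem.List.pyGet? l (((j'+1 : Nat) : Int) - 1) = some l[j'] := by
            rw [show (((j'+1 : Nat) : Int)) - 1 = (j' : Int) by push_cast; ring]
            simp [PySem.List.pyGet?_natCast, List.getElem?_eq_getElem hj']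
          have htake' : (l.take (j'+1)).reverse = l[j'] :: (l.take j').reverse := by
            rw [List.take_add_one, List.getElem?_eq_getElem hj']
            simp
          by_cases hr : l[j'] = '\r'
          case pos =>
            have hcond : ((0:Int) ≤ ((j'+1 : Nat) : Int) - 1 ∧
                PySem.List.pyGet? l (((j'+1 : Nat) : Int) - 1) = some '\r') := by
              constructor
              · push_cast; omega
              · rw [hget', hr]
            rw [dif_pos hcond]
            have hrec := ih j' (by omega) (cnt + 1) (by omega)
            rw [show (((j'+1 : Nat) : Int)) - 2 = ((j' : Nat) : Int) - 1 by push_cast; ring, hrec]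
            rw [htake', hr, kRev]
            push_cast; ring
          case neg =>
            have hcond : ¬ ((0:Int) ≤ ((j'+1 : Nat) : Int) - 1 ∧
                PySem.List.pyGet? l (((j'+1 : Nat) : Int) - 1) = some '\r') := by
              rintro ⟨-, h2⟩
              rw [hget'] at h2
              exact hr (Option.some.inj h2)
            rw [dif_neg hcond]
            have hrec := ih (j'+1) (by omega) (cnt + 1) (by omega)
            rw [hrec, kRev_nl _ (by rw [htake']; simp [hr])]
            push_cast; ring

-- ===== VERDICT (by name: the statement is the Claim_ definition above) =====
theorem count_trailing_newline_characters_py_spec : Claim_equal_count_trailing_newline_characters_py := by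
  intro s _
  unfold Spec_count_trailing_newline_characters_py
  unfold count_trailing_newline_characters_py count_trailing_newline_characters_py_alt
  have hlen : (PySem.Str.len s : Int) = (s.toList.length : Int) := by simp [PySem.Str.len_eq]
  rw [hlen, pyA_loop_eq s.toList.length s.toList 0 le_rfl]
  simp [matchFrom_count]
  rw [show List.take s.length s.toList = s.toList by rw [← String.length_toList, List.take_length]]
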